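-- pv_equiv track=rewrite | github.com/kcs342kcs/sqlalchemy_hw | app.py | daycheck
-- ===== SOURCE A (Python) =====
-- def daycheck(month,day):
--     monthlist1 = [1,3,5,7,8,10,12]
--     monthlist2 = [4,6,9,11]
--     monthlist3 = 2
--
--     for mon in monthlist1:
--         if month == mon:
--             if day >=1 and day <= 31:
--                 return True
--             else:
--                 return False
--
--     for mon in monthlist2:
--         if month == mon:
--             if day >= 1 and day <= 30:
--                 return True
--             else:
--                 return False
--
--     if month == monthlist3:
--         if day >=1 and day <= 29:
--             return True
--         else:
--             return False
-- ===== SOURCE B (Python) =====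
-- def daycheck(month, day):
--     # Arithmetic closed form: no month lists or table. For months 1..12,
--     # the 31-day months are exactly those where (month + month // 8) is odd.
--     if month < 1 or month > 12:
--         return None
--     maxday = 29 if month == 2 else 30 + (month + month // 8) % 2
--     return 1 <= day <= maxday
-- ===== Notes on version B (the rewrite author's own statement) =====
-- stated objective: alternative
-- what changed: Replaces A's scans over month lists plus a February special case with an arithmetic closed form: a single range guard on month and maxday = 30 + (month + month // 8) % 2 (29 for February), so no month collections exist at all.
import Mathlib
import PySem

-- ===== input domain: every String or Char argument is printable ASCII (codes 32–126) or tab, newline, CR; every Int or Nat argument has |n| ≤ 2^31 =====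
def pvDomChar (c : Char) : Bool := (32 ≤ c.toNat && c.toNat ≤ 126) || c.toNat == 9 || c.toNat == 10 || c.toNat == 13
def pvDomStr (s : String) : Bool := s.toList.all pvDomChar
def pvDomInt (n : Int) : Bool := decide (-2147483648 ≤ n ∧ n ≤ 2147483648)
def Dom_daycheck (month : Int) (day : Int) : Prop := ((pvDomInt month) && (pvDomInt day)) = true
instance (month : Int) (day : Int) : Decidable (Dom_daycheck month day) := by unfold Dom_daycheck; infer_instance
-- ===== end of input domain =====

-- B replaces A's month-list scans and February special case with an arithmetic
-- closed form (range guard + 30 + (month + month // 8) % 2); alternative, same cost.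

-- ===== PORT A =====
-- the Python 'for mon in list: if month == mon: return <bool>' loop; none = fell through
def pvScanA (l : List Int) (month : Int) (day : Int) (hi : Int) : Option Bool :=
  match l with
  | [] => none
  | m :: rest =>
    if month = m then some (decide (1 ≤ day ∧ day ≤ hi))
    else pvScanA rest month day hi

def daycheck (month : Int) (day : Int) : Option Bool :=
  match pvScanA [1,3,5,7,8,10,12] month day 31 with
  | some b => some b
  | none =>
    match pvScanA [4,6,9,11] month day 30 with
    | some b => some b
    | none =>
      if month = 2 then some (decide (1 ≤ day ∧ day ≤ 29)) else none

-- ===== PORT B =====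
def daycheck_alt (month : Int) (day : Int) : Option Bool :=
  if month < 1 ∨ month > 12 then none
  else
    let maxday : Int :=
      if month = 2 then 29
      else 30 + PySem.Int.mod (month + PySem.Int.floordiv month 8) 2
    some (decide (1 ≤ day ∧ day ≤ maxday))

-- ===== PRECONDITION & SPEC =====
def Spec_daycheck (month : Int) (day : Int) (out : Option Bool) : Prop := out = daycheck_alt month day
instance (month : Int) (day : Int) (out : Option Bool) : Decidable (Spec_daycheck month day out) := by unfold Spec_daycheck; infer_instance

-- ===== CLAIM (what is proved, stated in full; the proofs are below) =====
def Claim_equal_daycheck : Prop := ∀ (month : Int) (day : Int), Dom_daycheck month day → Spec_daycheck month day (daycheck month day)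

-- ===== LEMMAS AND PROOFS =====

-- ===== VERDICT (by name: the statement is the Claim_ definition above) =====
theorem daycheck_spec : Claim_equal_daycheck := by
  intro month day _
  unfold Spec_daycheck
  by_cases h : 1 ≤ month ∧ month ≤ 12
  · obtain ⟨h1, h2⟩ := h
    interval_cases month <;>
      simp [daycheck, daycheck_alt, pvScanA, PySem.Int.mod, PySem.Int.floordiv]
  · have hout : month < 1 ∨ month > 12 := by omega
    have hne : ∀ m : Int, 1 ≤ m → m ≤ 12 → month ≠ m := by
      intro m hm1 hm2 he; omega
    simp [daycheck, daycheck_alt, pvScanA, hout,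
      hne 1 (by norm_num) (by norm_num), hne 3 (by norm_num) (by norm_num),
      hne 5 (by norm_num) (by norm_num), hne 7 (by norm_num) (by norm_num),
      hne 8 (by norm_num) (by norm_num), hne 10 (by norm_num) (by norm_num),
      hne 12 (by norm_num) (by norm_num), hne 4 (by norm_num) (by norm_num),
      hne 6 (by norm_num) (by norm_num), hne 9 (by norm_num) (by norm_num),
      hne 11 (by norm_num) (by norm_num), hne 2 (by norm_num) (by norm_num)]
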